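-- pv_equiv track=rewrite | github.com/bverpaalen/CDE | MathTools.py | TailCounter
-- ===== SOURCE A (Python) =====
-- def TailCounter(bitArray, toCount):
--     counter = 0
--     for i in range(0,len(bitArray),1):
--         if bitArray[i] == toCount:
--             counter += 1
--         else:
--             counter = 0
--     return counter
-- ===== SOURCE B (Python) =====
-- def TailCounter(bitArray, toCount):
--     counter = 0
--     for x in reversed(bitArray):
--         if x != toCount:
--             break
--         counter += 1
--     return counter
-- ===== Notes on version B (the rewrite author's own statement) =====
-- stated objective: alternative
-- what changed: B scans the array from the back and stops at the first element differing from toCount, instead of A's forward accumulate-and-reset loop over the whole array.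
import Mathlib
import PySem

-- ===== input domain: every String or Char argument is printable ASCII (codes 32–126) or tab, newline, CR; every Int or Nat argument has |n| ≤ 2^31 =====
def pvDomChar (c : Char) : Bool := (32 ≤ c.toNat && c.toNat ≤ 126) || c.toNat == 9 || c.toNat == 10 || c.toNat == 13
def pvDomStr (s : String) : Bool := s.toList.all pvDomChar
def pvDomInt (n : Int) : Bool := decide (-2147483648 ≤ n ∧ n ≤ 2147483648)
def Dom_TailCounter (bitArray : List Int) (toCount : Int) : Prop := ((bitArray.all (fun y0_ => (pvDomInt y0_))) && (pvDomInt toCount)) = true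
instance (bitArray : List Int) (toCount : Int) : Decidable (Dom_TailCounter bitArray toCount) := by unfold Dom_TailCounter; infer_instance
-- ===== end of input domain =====

-- ===== PORT A =====
-- Port of A: forward loop, increment on match, reset to 0 on mismatch.
def TailCounter (bitArray : List Int) (toCount : Int) : Int :=
  bitArray.foldl (fun counter x => if x = toCount then counter + 1 else 0) 0

-- ===== PORT B =====
-- Port of B: scan the reversed list, count matches, stop (break) at first mismatch.
def tailAltLoop (toCount : Int) : List Int → Int
  | [] => 0
  | x :: xs => if x ≠ toCount then 0 else tailAltLoop toCount xs + 1

def TailCounter_alt (bitArray : List Int) (toCount : Int) : Int :=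
  tailAltLoop toCount bitArray.reverse

-- ===== PRECONDITION & SPEC =====
def Spec_TailCounter (bitArray : List Int) (toCount : Int) (out : Int) : Prop := out = TailCounter_alt bitArray toCount
instance (bitArray : List Int) (toCount : Int) (out : Int) : Decidable (Spec_TailCounter bitArray toCount out) := by unfold Spec_TailCounter; infer_instance

-- ===== CLAIM (what is proved, stated in full; the proofs are below) =====
def Claim_equal_TailCounter : Prop := ∀ (bitArray : List Int) (toCount : Int), Dom_TailCounter bitArray toCount → Spec_TailCounter bitArray toCount (TailCounter bitArray toCount)

-- ===== LEMMAS AND PROOFS =====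

-- ===== VERDICT (by name: the statement is the Claim_ definition above) =====
lemma tail_eq (toCount : Int) (l : List Int) :
    l.foldl (fun counter x => if x = toCount then counter + 1 else 0) 0
      = tailAltLoop toCount l.reverse := by
  induction l using List.reverseRecOn with
  | nil => rfl
  | append_singleton xs x ih =>
      by_cases h : x = toCount <;>
        simp [List.foldl_append, tailAltLoop, ih, h]

theorem TailCounter_spec : Claim_equal_TailCounter := by
  intro bitArray toCount _
  unfold Spec_TailCounter TailCounter TailCounter_alt
  exact tail_eq toCount bitArray
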